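-- pv_equiv track=rewrite | github.com/thanduli/aoc2025 | 03/task_two.py | get_max_between
-- ===== SOURCE A (Python) =====
-- def get_max_between(right_cuttoff, string):
--     if right_cuttoff == 0:
--         reduced_list = [int(c) for c in string]
--     else:
--         reduced_list= [int(c) for c in string[:-right_cuttoff]]
--     max_num= max(reduced_list)
--     split = string.find(str(max_num))+ 1
--     rest = string[split:]
--     return str(max_num), rest
-- ===== SOURCE B (Python) =====
-- def get_max_between(right_cuttoff, string):
--     prefix = string if right_cuttoff == 0 else string[:-right_cuttoff]
--     if not prefix:
--         raise ValueError("max() arg is an empty sequence")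
--     best = -1
--     first_index = 0
--     for i, c in enumerate(prefix):
--         d = int(c)
--         if best < d:
--             best = d
--             first_index = i
--     return str(best), string[first_index + 1:]
-- ===== Notes on version B (the rewrite author's own statement) =====
-- stated objective: alternative
-- what changed: Replaces A's three passes (build a digit list, max() over it, then string.find of str(max)) with a single enumerate pass over the prefix that tracks the running maximum digit and the index of its first occurrence.
import Mathlib
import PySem

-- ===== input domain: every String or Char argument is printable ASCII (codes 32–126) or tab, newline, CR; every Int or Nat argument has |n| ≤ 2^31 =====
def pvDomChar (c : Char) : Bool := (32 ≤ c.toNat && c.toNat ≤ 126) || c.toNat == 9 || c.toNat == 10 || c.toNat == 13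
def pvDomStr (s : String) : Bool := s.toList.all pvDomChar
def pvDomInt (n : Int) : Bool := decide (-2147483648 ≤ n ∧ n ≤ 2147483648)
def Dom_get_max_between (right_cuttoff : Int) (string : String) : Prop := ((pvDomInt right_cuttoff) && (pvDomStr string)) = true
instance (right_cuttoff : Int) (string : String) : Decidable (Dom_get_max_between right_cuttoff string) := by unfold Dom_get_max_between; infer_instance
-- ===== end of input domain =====

-- ===== PORT A =====
-- B differs from A only by a different decomposition (one fused pass instead of list+max+find); equal on Pre_.
-- int(c) for a single character c: PySem.Int.ofChars? [c]; total form with default 0 (Pre_ admits only digits, where it is some).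
def pvIntOfChar (c : Char) : Int := (PySem.Int.ofChars? [c]).getD 0

-- Port of A: build the list of digit values of the prefix, take max(), then string.find(str(max_num)).
def get_max_between (right_cuttoff : Int) (string : String) : String × String :=
  let reduced_list : List Int :=
    if right_cuttoff = 0 then
      string.toList.map (fun c => pvIntOfChar c)
    else
      (PySem.List.slice string.toList none (some (-right_cuttoff))).map (fun c => pvIntOfChar c)
  match PySem.List.max? reduced_list (fun x => x) with
  | none => ("", "")  -- max([]) raises ValueError in Python: outside Pre_
  | some max_num =>
      let split := PySem.Str.find string (PySem.Int.toStr max_num) + 1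
      let rest := PySem.Str.slice string (some split) none
      (PySem.Int.toStr max_num, rest)

-- ===== PORT B =====
-- loop body of B: update (best, first_index) when a strictly greater digit d appears
def pvStep (acc : Int × Int) (p : Int × Char) : Int × Int :=
  if acc.1 < pvIntOfChar p.2 then (pvIntOfChar p.2, p.1) else acc

-- Port of B: one enumerate pass over the prefix tracking the running max digit and its first index.
def get_max_between_alt (right_cuttoff : Int) (string : String) : String × String :=
  let pfx : List Char :=
    if right_cuttoff = 0 then string.toList
    else PySem.List.slice string.toList none (some (-right_cuttoff))
  if pfx = [] then ("", "")  -- Source B raises ValueError here: outside Pre_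
  else
    let r := (PySem.List.enumerate pfx 0).foldl pvStep (-1, 0)
    (PySem.Int.toStr r.1, PySem.Str.slice string (some (r.2 + 1)) none)

-- ===== PRECONDITION & SPEC =====
-- Pre_ excludes exactly the inputs on which the Python A raises: an empty prefix (max([]) raises
-- ValueError) or a non-digit character in the prefix (int(c) raises ValueError); B raises there too.
def Pre_get_max_between (right_cuttoff : Int) (string : String) : Prop :=
  let p : List Char :=
    if right_cuttoff = 0 then string.toList
    else PySem.List.slice string.toList none (some (-right_cuttoff))
  p ≠ [] ∧ p.all (fun c => c.isDigit) = true
instance (right_cuttoff : Int) (string : String) : Decidable (Pre_get_max_between right_cuttoff string) := by unfold Pre_get_max_between; infer_instance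

def pvWitness_get_max_between : Int × String := (1, "283x")

def Spec_get_max_between (right_cuttoff : Int) (string : String) (out : String × String) : Prop := out = get_max_between_alt right_cuttoff string
instance (right_cuttoff : Int) (string : String) (out : String × String) : Decidable (Spec_get_max_between right_cuttoff string out) := by unfold Spec_get_max_between; infer_instance

-- ===== CLAIM (what is proved, stated in full; the proofs are below) =====
def Claim_equal_get_max_between : Prop := ∀ (right_cuttoff : Int) (string : String), Dom_get_max_between right_cuttoff string → Pre_get_max_between right_cuttoff string → Spec_get_max_between right_cuttoff string (get_max_between right_cuttoff string)

-- ===== LEMMAS AND PROOFS =====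

lemma pv_digit_cases (c : Char) (h : c.isDigit = true) :
    c = '0' ∨ c = '1' ∨ c = '2' ∨ c = '3' ∨ c = '4' ∨ c = '5' ∨ c = '6' ∨ c = '7' ∨ c = '8' ∨ c = '9' := by
  have hb : 48 ≤ c.toNat ∧ c.toNat ≤ 57 := by
    simp [Char.isDigit] at h
    exact ⟨h.1, h.2⟩
  have hc : Char.ofNat c.toNat = c := Char.ofNat_toNat c
  obtain ⟨h1, h2⟩ := hb
  interval_cases h : c.toNat <;> rw [← hc] <;> decide

lemma pv_digit_nonneg (c : Char) (h : c.isDigit = true) : 0 ≤ pvIntOfChar c := by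
  rcases pv_digit_cases c h with h|h|h|h|h|h|h|h|h|h <;> subst h <;> decide

lemma pv_digit_toChars (c : Char) (h : c.isDigit = true) :
    PySem.Int.toChars (pvIntOfChar c) = [c] := by
  rcases pv_digit_cases c h with h|h|h|h|h|h|h|h|h|h <;> subst h <;> decide

-- [a] is a prefix of l.drop j iff l[j]? = some a
lemma pv_singleton_prefix_drop {α : Type} (l : List α) (j : Nat) (a : α) :
    [a] <+: l.drop j ↔ l[j]? = some a := by
  rw [← List.head?_drop]
  cases l.drop j with
  | nil => simp
  | cons x t => simp [List.prefix_cons_iff, eq_comm]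

-- the loop invariant of B's single pass
lemma pv_fold_spec (l : List Char) (s b i : Int) :
    (∀ c ∈ l, pvIntOfChar c ≤ ((PySem.List.enumerate l s).foldl pvStep (b, i)).1) ∧
    b ≤ ((PySem.List.enumerate l s).foldl pvStep (b, i)).1 ∧
    ((PySem.List.enumerate l s).foldl pvStep (b, i) = (b, i) ∨
      ∃ (k : Nat) (hk : k < l.length),
        ((PySem.List.enumerate l s).foldl pvStep (b, i)).2 = s + k ∧
        pvIntOfChar (l[k]'hk) = ((PySem.List.enumerate l s).foldl pvStep (b, i)).1 ∧
        b < ((PySem.List.enumerate l s).foldl pvStep (b, i)).1 ∧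
        ∀ (j : Nat) (hj : j < k), pvIntOfChar (l[j]'(hj.trans hk)) < ((PySem.List.enumerate l s).foldl pvStep (b, i)).1) := by
  induction l generalizing s b i with
  | nil => simp [PySem.List.enumerate_nil]
  | cons c t ih =>
    rw [PySem.List.enumerate_cons]
    simp only [List.foldl_cons]
    by_cases hlt : b < pvIntOfChar c
    · have hstep : pvStep (b, i) (s, c) = (pvIntOfChar c, s) := by simp [pvStep, hlt]
      rw [hstep]
      obtain ⟨Hall, Hle, Hdisj⟩ := ih (s+1) (pvIntOfChar c) s
      refine ⟨?_, by omega, ?_⟩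
      · intro c' hc'
        rcases List.mem_cons.1 hc' with rfl | hc'
        · exact Hle
        · exact Hall c' hc'
      · right
        rcases Hdisj with heq | ⟨k, hk, h2, h3, h4, h5⟩
        · refine ⟨0, by simp, ?_, ?_, ?_, ?_⟩
          · rw [heq]; simp
          · rw [heq]; simp
          · rw [heq]; exact hlt
          · intro j hj; omega
        · refine ⟨k+1, by simpa using hk, by rw [h2]; push_cast; ring, h3, by omega, ?_⟩
          intro j hj
          cases j with
          | zero => simpa using h4
          | succ j' => exact h5 j' (by omega)
    · have hstep : pvStep (b, i) (s, c) = (b, i) := by simp [pvStep, hlt]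
      rw [hstep]
      obtain ⟨Hall, Hle, Hdisj⟩ := ih (s+1) b i
      refine ⟨?_, Hle, ?_⟩
      · intro c' hc'
        rcases List.mem_cons.1 hc' with rfl | hc'
        · omega
        · exact Hall c' hc'
      · rcases Hdisj with heq | ⟨k, hk, h2, h3, h4, h5⟩
        · left; exact heq
        · right
          refine ⟨k+1, by simpa using hk, by rw [h2]; push_cast; ring, h3, h4, ?_⟩
          intro j hj
          cases j with
          | zero => simpa using lt_of_le_of_lt (by omega : pvIntOfChar c ≤ b) h4
          | succ j' => exact h5 j' (by omega)

-- every prefix slice used by the two ports is a take of the full character list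
lemma pv_slice_is_take {α : Type} (xs : List α) (b : Int) :
    ∃ n, PySem.List.slice xs none (some b) = xs.take n := by
  rcases (by omega : 0 ≤ b ∨ b < 0) with hb | hb
  · exact ⟨b.toNat, PySem.List.slice_to xs hb⟩
  · have hk : 0 < (-b).toNat := by omega
    have hb' : b = -((-b).toNat : Int) := by omega
    have h := PySem.List.slice_to_neg_natCast xs ((-b).toNat) hk
    rw [← hb'] at h
    exact ⟨xs.length - (-b).toNat, h⟩


-- the heart of the equivalence: on an all-digit nonempty prefix of the string, A's max() is B's
-- running maximum and A's find() lands on B's tracked first index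
lemma pv_core (s : String) (P : List Char) (hPt : ∃ n, P = s.toList.take n)
    (hne : P ≠ []) (hdig : ∀ c ∈ P, c.isDigit = true) :
    PySem.List.max? (P.map pvIntOfChar) (fun x => x) = some (((PySem.List.enumerate P 0).foldl pvStep (-1, 0)).1) ∧
    PySem.Str.find s (PySem.Int.toStr (((PySem.List.enumerate P 0).foldl pvStep (-1, 0)).1)) = ((PySem.List.enumerate P 0).foldl pvStep (-1, 0)).2 := by
  obtain ⟨n, hPt⟩ := hPt
  obtain ⟨Hall, -, Hdisj⟩ := pv_fold_spec P 0 (-1) 0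
  set R := (PySem.List.enumerate P 0).foldl pvStep (-1, 0) with hR
  -- the left disjunct (no update ever) is impossible: every digit is ≥ 0 > -1
  rcases Hdisj with heq | ⟨k, hk, h2, h3, h4, h5⟩
  · exfalso
    rcases P with _ | ⟨c0, t⟩
    · exact hne rfl
    · have h1 : pvIntOfChar c0 ≤ R.1 := Hall c0 (List.mem_cons_self)
      have h0 : 0 ≤ pvIntOfChar c0 := pv_digit_nonneg c0 (hdig c0 List.mem_cons_self)
      rw [heq] at h1
      omega
  · have hRk : R.2 = (k : Int) := by omega
    have hdm : (P[k]'hk).isDigit = true := hdig _ (List.getElem_mem hk)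
    constructor
    · -- A's max() equals B's running maximum
      rcases hM : PySem.List.max? (P.map pvIntOfChar) (fun x => x) with _ | M
      · exfalso
        have h0 := (PySem.List.max?_eq_none_iff _ _).1 hM
        rw [List.map_eq_nil_iff] at h0
        exact hne h0
      · have hub := PySem.List.max?_isMax hM
        have hmem := PySem.List.max?_mem hM
        have hR1mem : R.1 ∈ P.map pvIntOfChar := by
          rw [← h3]
          exact List.mem_map_of_mem (List.getElem_mem hk)
        have hle1 : R.1 ≤ M := hub R.1 hR1mem
        obtain ⟨c, hcP, hcM⟩ := List.mem_map.1 hmem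
        have hle2 : M ≤ R.1 := hcM ▸ Hall c hcP
        rw [le_antisymm hle2 hle1]
    · -- A's find() lands exactly on B's tracked first index
      have htc : (PySem.Int.toStr R.1).toList = [P[k]'hk] := by
        rw [PySem.Int.toList_toStr, ← h3, pv_digit_toChars _ hdm]
      have hfind : PySem.Str.find s (PySem.Int.toStr R.1) = PySem.Chars.find s.toList [P[k]'hk] := by
        rw [PySem.Str.find_eq, htc]
      have hlenP : P.length ≤ s.toList.length := by
        rw [hPt, List.length_take]
        exact Nat.min_le_right n s.toList.length
      have hkcs : k < s.toList.length := lt_of_lt_of_le hk hlenP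
      have hPg : ∀ (j : Nat) (hj : j < P.length), P[j]'hj = s.toList[j]'(lt_of_lt_of_le hj hlenP) := by
        intro j hj
        subst hPt
        exact List.getElem_take
      have hocc : [P[k]'hk] <+: s.toList.drop k := by
        rw [pv_singleton_prefix_drop, List.getElem?_eq_getElem hkcs, hPg k hk]
      have hinf : [P[k]'hk] <:+: s.toList :=
        List.IsInfix.trans hocc.isInfix (List.drop_suffix k s.toList).isInfix
      have hnonneg : 0 ≤ PySem.Chars.find s.toList [P[k]'hk] :=
        (PySem.Chars.find_nonneg_iff _ _).2 hinf
      obtain ⟨hfp, hmin⟩ := PySem.Chars.find_spec hnonneg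
      have hFk : (PySem.Chars.find s.toList [P[k]'hk]).toNat = k := by
        by_contra hne'
        rcases Nat.lt_or_ge (PySem.Chars.find s.toList [P[k]'hk]).toNat k with hF | hF
        · -- an earlier occurrence would contradict strictness before k
          have hFP : (PySem.Chars.find s.toList [P[k]'hk]).toNat < P.length := lt_trans hF hk
          rw [pv_singleton_prefix_drop, List.getElem?_eq_getElem (lt_of_lt_of_le hFP hlenP), ← hPg _ hFP] at hfp
          have hlt := h5 _ hF
          rw [Option.some_inj] at hfp
          rw [hfp, h3] at hlt
          exact lt_irrefl _ hlt
        · exact hmin k (lt_of_le_of_ne hF (Ne.symm hne')) hocc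
      rw [hfind, hRk]
      omega

-- ===== VERDICT (by name: the statement is the Claim_ definition above) =====
theorem get_max_between_spec : Claim_equal_get_max_between := by
  intro r s _ hpre
  unfold Spec_get_max_between
  unfold Pre_get_max_between at hpre
  obtain ⟨hne, hdig⟩ := hpre
  by_cases h0 : r = 0
  · rw [if_pos h0] at hne hdig
    rw [List.all_eq_true] at hdig
    obtain ⟨hmax, hfind⟩ := pv_core s s.toList ⟨s.toList.length, by simp⟩ hne hdig
    simp only [get_max_between, get_max_between_alt, h0, if_pos, if_neg hne, hmax, hfind]
  · rw [if_neg h0] at hne hdig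
    rw [List.all_eq_true] at hdig
    obtain ⟨hmax, hfind⟩ := pv_core s _ (pv_slice_is_take s.toList (-r)) hne hdig
    simp only [get_max_between, get_max_between_alt, if_neg h0, if_neg hne, hmax, hfind]
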